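-- pv_equiv track=rewrite | github.com/tokenwaster76/caude-remote | qr_code.py | _generate_qr_fallback
-- ===== SOURCE A (Python) =====
-- def _generate_qr_fallback(data: str) -> list[list[int]]:
--     """Simple fallback QR-like matrix when qrcode library is unavailable.
--
--     Generates a basic pattern encoding the data length and hash.
--     Not a real QR code but provides a visual representation.
--     """
--     size = 21  # Version 1 QR code size
--     matrix = [[0] * size for _ in range(size)]
--
--     # Add finder patterns (top-left, top-right, bottom-left)
--     _add_finder_pattern(matrix, 0, 0)
--     _add_finder_pattern(matrix, 0, size - 7)
--     _add_finder_pattern(matrix, size - 7, 0)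
--
--     # Add timing patterns
--     for i in range(8, size - 8):
--         matrix[6][i] = 1 if i % 2 == 0 else 0
--         matrix[i][6] = 1 if i % 2 == 0 else 0
--
--     # Encode data as a simple hash-based pattern in the data area
--     data_hash = 0
--     for ch in data:
--         data_hash = (data_hash * 31 + ord(ch)) & 0xFFFFFFFF
--
--     for r in range(size):
--         for c in range(size):
--             if matrix[r][c] == 0 and not _is_reserved(r, c, size):
--                 bit = (data_hash >> ((r * size + c) % 32)) & 1
--                 matrix[r][c] = bit
--
--     return matrix
--
-- def _add_finder_pattern(matrix: list[list[int]], row: int, col: int) -> None: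
--     """Add a 7x7 finder pattern at the given position."""
--     pattern = [
--         [1, 1, 1, 1, 1, 1, 1],
--         [1, 0, 0, 0, 0, 0, 1],
--         [1, 0, 1, 1, 1, 0, 1],
--         [1, 0, 1, 1, 1, 0, 1],
--         [1, 0, 1, 1, 1, 0, 1],
--         [1, 0, 0, 0, 0, 0, 1],
--         [1, 1, 1, 1, 1, 1, 1],
--     ]
--     for r in range(7):
--         for c in range(7):
--             if 0 <= row + r < len(matrix) and 0 <= col + c < len(matrix[0]):
--                 matrix[row + r][col + c] = pattern[r][c]
--
-- def _is_reserved(row: int, col: int, size: int) -> bool: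
--     """Check if a cell is reserved for finder/timing patterns."""
--     # Finder pattern regions (including separators)
--     if row < 8 and col < 8:
--         return True
--     if row < 8 and col >= size - 8:
--         return True
--     if row >= size - 8 and col < 8:
--         return True
--     # Timing patterns
--     if row == 6 or col == 6:
--         return True
--     return False
-- ===== SOURCE B (Python) =====
-- def _generate_qr_fallback(data: str) -> list[list[int]]:
--     """Build the 21x21 matrix in one pass, classifying each cell by position
--     instead of mutating a matrix in phases."""
--     size = 21
--     finder = [
--         [1, 1, 1, 1, 1, 1, 1],
--         [1, 0, 0, 0, 0, 0, 1],
--         [1, 0, 1, 1, 1, 0, 1],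
--         [1, 0, 1, 1, 1, 0, 1],
--         [1, 0, 1, 1, 1, 0, 1],
--         [1, 0, 0, 0, 0, 0, 1],
--         [1, 1, 1, 1, 1, 1, 1],
--     ]
--     data_hash = 0
--     for ch in data:
--         data_hash = (data_hash * 31 + ord(ch)) & 0xFFFFFFFF
--
--     def cell(r: int, c: int) -> int:
--         if r < 7 and c < 7:
--             return finder[r][c]
--         if r < 7 and c >= size - 7:
--             return finder[r][c - (size - 7)]
--         if r >= size - 7 and c < 7:
--             return finder[r - (size - 7)][c]
--         if (r == 6 and 8 <= c <= 12) or (c == 6 and 8 <= r <= 12):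
--             idx = c if r == 6 else r
--             return 1 if idx % 2 == 0 else 0
--         if (r < 8 and (c < 8 or c >= size - 8)) or (r >= size - 8 and c < 8):
--             return 0
--         if r == 6 or c == 6:
--             return 0
--         return (data_hash >> ((r * size + c) % 32)) & 1
--
--     return [[cell(r, c) for c in range(size)] for r in range(size)]
-- ===== Notes on version B (the rewrite author's own statement) =====
-- stated objective: alternative
-- what changed: B replaces A's mutate-in-phases construction (blank matrix, three finder-pattern stampings, timing-pattern loop, then a conditional fill pass re-reading the matrix) by a single nested pass that computes each cell's final value once by classifying its position (finder region / timing segment / reserved / data bit).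
import Mathlib
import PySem

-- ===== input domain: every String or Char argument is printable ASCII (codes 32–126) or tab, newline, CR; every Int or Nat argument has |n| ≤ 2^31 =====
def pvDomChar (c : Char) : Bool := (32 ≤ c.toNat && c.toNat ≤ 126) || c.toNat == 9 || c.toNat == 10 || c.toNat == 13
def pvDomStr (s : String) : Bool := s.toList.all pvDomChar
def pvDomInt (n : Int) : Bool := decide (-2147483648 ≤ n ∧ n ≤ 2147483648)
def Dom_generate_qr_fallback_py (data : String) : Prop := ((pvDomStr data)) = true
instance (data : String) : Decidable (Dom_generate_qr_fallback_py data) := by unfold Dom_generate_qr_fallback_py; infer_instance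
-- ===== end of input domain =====

-- B builds the 21x21 matrix in one pass, classifying each cell by its position,
-- instead of A's mutate-in-phases construction (objective: alternative decomposition).

-- ===== PORT A =====
-- literal `pattern` from _add_finder_pattern
def qrPatternA : List (List Int) :=
  [[1,1,1,1,1,1,1],[1,0,0,0,0,0,1],[1,0,1,1,1,0,1],[1,0,1,1,1,0,1],
   [1,0,1,1,1,0,1],[1,0,0,0,0,0,1],[1,1,1,1,1,1,1]]

-- matrix[r][c] read; every use below has r,c nonnegative and in range, where pyGetD is exact
def mgetA (m : List (List Int)) (r c : Int) : Int :=
  PySem.List.pyGetD (PySem.List.pyGetD m r []) c 0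

-- matrix[r][c] = v ; every use below has r,c nonnegative and in range, where pySetD is exact
def msetA (m : List (List Int)) (r c : Int) (v : Int) : List (List Int) :=
  PySem.List.pySetD m r (PySem.List.pySetD (PySem.List.pyGetD m r []) c v)

-- port of _add_finder_pattern (in-place mutation becomes a fold carrying the matrix)
def add_finder_pattern_py (m : List (List Int)) (row col : Int) : List (List Int) :=
  (PySem.List.pyRange 0 7 1).foldl (fun m r =>
    (PySem.List.pyRange 0 7 1).foldl (fun m c =>
      if 0 ≤ row + r && row + r < PySem.List.len m
          && 0 ≤ col + c && col + c < PySem.List.len (PySem.List.pyGetD m 0 [])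
      then msetA m (row + r) (col + c) (mgetA qrPatternA r c)
      else m) m) m

-- port of _is_reserved
def is_reserved_py (row col size : Int) : Bool :=
  if row < 8 && col < 8 then true
  else if row < 8 && col ≥ size - 8 then true
  else if row ≥ size - 8 && col < 8 then true
  else if row == 6 || col == 6 then true
  else false

def generate_qr_fallback_py (data : String) : List (List Int) :=
  let size : Int := 21
  let matrix : List (List Int) := List.replicate 21 (List.replicate 21 (0 : Int))
  let matrix := add_finder_pattern_py matrix 0 0
  let matrix := add_finder_pattern_py matrix 0 (size - 7)
  let matrix := add_finder_pattern_py matrix (size - 7) 0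
  let matrix := (PySem.List.pyRange 8 (size - 8) 1).foldl (fun m i =>
    let m := msetA m 6 i (if PySem.Int.mod i 2 == 0 then 1 else 0)
    msetA m i 6 (if PySem.Int.mod i 2 == 0 then 1 else 0)) matrix
  let data_hash : Int := data.toList.foldl
    (fun h ch => PySem.Int.band (h * 31 + (ch.toNat : Int)) 0xFFFFFFFF) 0
  (PySem.List.pyRange 0 size 1).foldl (fun m r =>
    (PySem.List.pyRange 0 size 1).foldl (fun m c =>
      if mgetA m r c == 0 && !is_reserved_py r c size
      then msetA m r c (PySem.Int.band (data_hash >>> (PySem.Int.mod (r * size + c) 32).toNat) 1)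
      else m) m) matrix

-- ===== PORT B =====
def qrFinderB : List (List Int) :=
  [[1,1,1,1,1,1,1],[1,0,0,0,0,0,1],[1,0,1,1,1,0,1],[1,0,1,1,1,0,1],
   [1,0,1,1,1,0,1],[1,0,0,0,0,0,1],[1,1,1,1,1,1,1]]

-- finder[r][c]; every use has r,c in 0..6, where pyGetD is exact
def finB (r c : Int) : Int :=
  PySem.List.pyGetD (PySem.List.pyGetD qrFinderB r []) c 0

-- port of Source B's local `cell`
def qrCellB (size data_hash r c : Int) : Int :=
  if r < 7 && c < 7 then finB r c
  else if r < 7 && c ≥ size - 7 then finB r (c - (size - 7))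
  else if r ≥ size - 7 && c < 7 then finB (r - (size - 7)) c
  else if (r == 6 && 8 ≤ c && c ≤ 12) || (c == 6 && 8 ≤ r && r ≤ 12) then
    let idx := if r == 6 then c else r
    if PySem.Int.mod idx 2 == 0 then 1 else 0
  else if (r < 8 && (c < 8 || c ≥ size - 8)) || (r ≥ size - 8 && c < 8) then 0
  else if r == 6 || c == 6 then 0
  else PySem.Int.band (data_hash >>> (PySem.Int.mod (r * size + c) 32).toNat) 1

def generate_qr_fallback_py_alt (data : String) : List (List Int) :=
  let size : Int := 21
  let data_hash : Int := data.toList.foldl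
    (fun h ch => PySem.Int.band (h * 31 + (ch.toNat : Int)) 0xFFFFFFFF) 0
  (PySem.List.pyRange 0 size 1).map (fun r =>
    (PySem.List.pyRange 0 size 1).map (fun c => qrCellB size data_hash r c))

-- ===== PRECONDITION & SPEC =====
def Spec_generate_qr_fallback_py (data : String) (out : List (List Int)) : Prop := out = generate_qr_fallback_py_alt data
instance (data : String) (out : List (List Int)) : Decidable (Spec_generate_qr_fallback_py data out) := by unfold Spec_generate_qr_fallback_py; infer_instance

-- ===== CLAIM =====
def Claim_equal_generate_qr_fallback_py : Prop := ∀ (data : String), Dom_generate_qr_fallback_py data → Spec_generate_qr_fallback_py data (generate_qr_fallback_py data)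

-- ===== LEMMAS AND PROOFS =====

-- the matrix A has built just before the data-fill pass (finder + timing patterns)
def qrM0 : List (List Int) := [
   [1,1,1,1,1,1,1,0,0,0,0,0,0,0,1,1,1,1,1,1,1],
   [1,0,0,0,0,0,1,0,0,0,0,0,0,0,1,0,0,0,0,0,1],
   [1,0,1,1,1,0,1,0,0,0,0,0,0,0,1,0,1,1,1,0,1],
   [1,0,1,1,1,0,1,0,0,0,0,0,0,0,1,0,1,1,1,0,1],
   [1,0,1,1,1,0,1,0,0,0,0,0,0,0,1,0,1,1,1,0,1],
   [1,0,0,0,0,0,1,0,0,0,0,0,0,0,1,0,0,0,0,0,1],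
   [1,1,1,1,1,1,1,0,1,0,1,0,1,0,1,1,1,1,1,1,1],
   [0,0,0,0,0,0,0,0,0,0,0,0,0,0,0,0,0,0,0,0,0],
   [0,0,0,0,0,0,1,0,0,0,0,0,0,0,0,0,0,0,0,0,0],
   [0,0,0,0,0,0,0,0,0,0,0,0,0,0,0,0,0,0,0,0,0],
   [0,0,0,0,0,0,1,0,0,0,0,0,0,0,0,0,0,0,0,0,0],
   [0,0,0,0,0,0,0,0,0,0,0,0,0,0,0,0,0,0,0,0,0],
   [0,0,0,0,0,0,1,0,0,0,0,0,0,0,0,0,0,0,0,0,0],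
   [0,0,0,0,0,0,0,0,0,0,0,0,0,0,0,0,0,0,0,0,0],
   [1,1,1,1,1,1,1,0,0,0,0,0,0,0,0,0,0,0,0,0,0],
   [1,0,0,0,0,0,1,0,0,0,0,0,0,0,0,0,0,0,0,0,0],
   [1,0,1,1,1,0,1,0,0,0,0,0,0,0,0,0,0,0,0,0,0],
   [1,0,1,1,1,0,1,0,0,0,0,0,0,0,0,0,0,0,0,0,0],
   [1,0,1,1,1,0,1,0,0,0,0,0,0,0,0,0,0,0,0,0,0],
   [1,0,0,0,0,0,1,0,0,0,0,0,0,0,0,0,0,0,0,0,0],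
   [1,1,1,1,1,1,1,0,0,0,0,0,0,0,0,0,0,0,0,0,0]]

def qrSq (m : List (List Int)) : Prop := m.length = 21 ∧ ∀ row ∈ m, row.length = 21

theorem qr_row_len' {m : List (List Int)} (hm : qrSq m) {i : Nat} (hi : i < m.length) :
    (m[i]).length = 21 := hm.2 _ (List.getElem_mem hi)

theorem qr_rowD_len {m : List (List Int)} (hm : qrSq m) {i : Nat} (hi : i < m.length) :
    (m.getD i []).length = 21 := by
  rw [List.getD_eq_getElem _ _ hi]; exact hm.2 _ (List.getElem_mem hi)

theorem qr_mget_eq (m : List (List Int)) {i j : Int} (hi0 : 0 ≤ i) (hj0 : 0 ≤ j) :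
    mgetA m i j = (m.getD i.toNat []).getD j.toNat 0 := by
  unfold mgetA
  rw [PySem.List.pyGetD_of_nonneg _ _ hi0, PySem.List.pyGetD_of_nonneg _ _ hj0]

theorem qr_mset_eq (m : List (List Int)) {r c : Int} (hr0 : 0 ≤ r) (hc0 : 0 ≤ c) (v : Int) :
    msetA m r c v = m.set r.toNat ((m.getD r.toNat []).set c.toNat v) := by
  unfold msetA
  rw [PySem.List.pySetD_of_nonneg _ _ hr0, PySem.List.pySetD_of_nonneg _ _ hc0,
      PySem.List.pyGetD_of_nonneg _ _ hr0]

theorem qr_sq_mset {m : List (List Int)} (hm : qrSq m) {r c : Int} (hr0 : 0 ≤ r)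
    (hr : r < 21) (hc0 : 0 ≤ c) (v : Int) : qrSq (msetA m r c v) := by
  rw [qr_mset_eq m hr0 hc0 v]
  refine ⟨by simpa using hm.1, ?_⟩
  intro row hrow
  rcases List.mem_or_eq_of_mem_set hrow with h | h
  · exact hm.2 _ h
  · subst h; simpa using qr_rowD_len hm (show r.toNat < m.length by have := hm.1; omega)

theorem qr_getD_set (xs : List (List Int)) (a : Nat) (row : List Int) (b : Nat) :
    (xs.set a row).getD b [] = if a = b ∧ a < xs.length then row else xs.getD b [] := by
  simp only [List.getD_eq_getElem?_getD, List.getElem?_set]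
  split_ifs with h1 h2 h3 h4 <;> simp_all <;> omega

theorem qr_getD_set_int (xs : List Int) (a : Nat) (v : Int) (b : Nat) :
    (xs.set a v).getD b 0 = if a = b ∧ a < xs.length then v else xs.getD b 0 := by
  simp only [List.getD_eq_getElem?_getD, List.getElem?_set]
  split_ifs with h1 h2 h3 h4 <;> simp_all <;> omega

theorem qr_mget_mset {m : List (List Int)} (hm : qrSq m) {r c i j : Int} (hr0 : 0 ≤ r)
    (hr : r < 21) (hc0 : 0 ≤ c) (hc : c < 21) (hi0 : 0 ≤ i) (hi : i < 21) (hj0 : 0 ≤ j)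
    (hj : j < 21) (v : Int) :
    mgetA (msetA m r c v) i j = if i = r ∧ j = c then v else mgetA m i j := by
  rw [qr_mget_eq _ hi0 hj0, qr_mget_eq _ hi0 hj0, qr_mset_eq m hr0 hc0 v, qr_getD_set,
      apply_ite (fun (row : List Int) => row.getD j.toNat 0), qr_getD_set_int]
  have hl := hm.1
  have hrl := qr_rowD_len hm (show r.toNat < m.length by omega)
  split_ifs with h1 h2 h3 <;> try rfl
  · omega
  · exfalso; omega
  · rw [h1.1]
  · exfalso; omega

theorem qr_inner_sq (f : Int → Int → Bool) (g : Int → Int) (r : Int) (hr0 : 0 ≤ r)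
    (hr : r < 21) (cs : List Int) :
    ∀ (m : List (List Int)), qrSq m → (∀ c ∈ cs, 0 ≤ c ∧ c < 21) →
    qrSq (cs.foldl (fun m c => if f c (mgetA m r c) then msetA m r c (g c) else m) m) := by
  induction cs with
  | nil => intro m hm _; exact hm
  | cons c cs ih =>
    intro m hm hb
    simp only [List.foldl_cons]
    refine ih _ ?_ (fun x hx => hb x (List.mem_cons_of_mem _ hx))
    split_ifs with h
    · exact qr_sq_mset hm hr0 hr (hb c List.mem_cons_self).1 (g c)
    · exact hm

theorem qr_inner_entry (f : Int → Int → Bool) (g : Int → Int) (r : Int) (hr0 : 0 ≤ r)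
    (hr : r < 21) (cs : List Int) :
    ∀ (m : List (List Int)), qrSq m → cs.Nodup → (∀ c ∈ cs, 0 ≤ c ∧ c < 21) →
    ∀ (i j : Int), 0 ≤ i → i < 21 → 0 ≤ j → j < 21 →
    mgetA (cs.foldl (fun m c => if f c (mgetA m r c) then msetA m r c (g c) else m) m) i j
      = if i = r ∧ j ∈ cs ∧ f j (mgetA m r j) = true then g j else mgetA m i j := by
  induction cs with
  | nil => intro m hm _ _ i j hi0 hi hj0 hj; simp
  | cons c cs ih =>
    intro m hm hnd hb i j hi0 hi hj0 hj
    have hc0 : 0 ≤ c := (hb c List.mem_cons_self).1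
    have hc : c < 21 := (hb c List.mem_cons_self).2
    have hb' : ∀ x ∈ cs, 0 ≤ x ∧ x < 21 := fun x hx => hb x (List.mem_cons_of_mem _ hx)
    have hcn : c ∉ cs := (List.nodup_cons.mp hnd).1
    simp only [List.foldl_cons]
    set m' := if f c (mgetA m r c) then msetA m r c (g c) else m with hm'
    have hsq' : qrSq m' := by
      rw [hm']; split_ifs with h
      · exact qr_sq_mset hm hr0 hr hc0 (g c)
      · exact hm
    rw [ih m' hsq' (List.nodup_cons.mp hnd).2 hb' i j hi0 hi hj0 hj]
    have hget : ∀ (a b : Int), 0 ≤ a → a < 21 → 0 ≤ b → b < 21 →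
        mgetA m' a b = if a = r ∧ b = c ∧ f c (mgetA m r c) = true then g c else mgetA m a b := by
      intro a b ha0 ha hb0 hbb
      rw [hm']; split_ifs with h h2 h2
      · rw [qr_mget_mset hm hr0 hr hc0 hc ha0 ha hb0 hbb, if_pos ⟨h2.1, h2.2.1⟩]
      · rw [qr_mget_mset hm hr0 hr hc0 hc ha0 ha hb0 hbb, if_neg (by
          intro hh; exact h2 ⟨hh.1, hh.2, h⟩)]
      · exact absurd h2.2.2 h
      · rfl
    by_cases hjcs : j ∈ cs
    · have hjc : j ≠ c := fun he => hcn (he ▸ hjcs)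
      have hrj : mgetA m' r j = mgetA m r j := by
        rw [hget r j hr0 hr hj0 hj]; exact if_neg (fun hh => hjc hh.2.1)
      have hij : mgetA m' i j = mgetA m i j := by
        rw [hget i j hi0 hi hj0 hj]; exact if_neg (fun hh => hjc hh.2.1)
      rw [hrj, hij]
      by_cases hcond : i = r ∧ j ∈ cs ∧ f j (mgetA m r j) = true
      · rw [if_pos hcond, if_pos ⟨hcond.1, List.mem_cons_of_mem _ hcond.2.1, hcond.2.2⟩]
      · rw [if_neg hcond, if_neg (fun hh => hcond ⟨hh.1, hjcs, hh.2.2⟩)]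
    · have hnot : ¬(i = r ∧ j ∈ cs ∧ f j (mgetA m' r j) = true) := fun hh => hjcs hh.2.1
      rw [if_neg hnot, hget i j hi0 hi hj0 hj]
      by_cases hcase : i = r ∧ j = c ∧ f c (mgetA m r c) = true
      · rw [if_pos hcase, if_pos ⟨hcase.1, by rw [hcase.2.1]; exact List.mem_cons_self,
            by rw [hcase.2.1]; exact hcase.2.2⟩, hcase.2.1]
      · rw [if_neg hcase, if_neg (fun hh => by
          rcases List.mem_cons.mp hh.2.1 with he | he
          · exact hcase ⟨hh.1, he, he ▸ hh.2.2⟩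
          · exact hjcs he)]

theorem qr_outer_sq (f2 : Int → Int → Int → Bool) (g2 : Int → Int → Int) (cs : List Int)
    (hcb : ∀ c ∈ cs, 0 ≤ c ∧ c < 21) (rs : List Int) :
    ∀ (m : List (List Int)), qrSq m → (∀ r ∈ rs, 0 ≤ r ∧ r < 21) →
    qrSq (rs.foldl (fun m r => cs.foldl
      (fun m c => if f2 r c (mgetA m r c) then msetA m r c (g2 r c) else m) m) m) := by
  induction rs with
  | nil => intro m hm _; exact hm
  | cons r rs ih =>
    intro m hm hb
    simp only [List.foldl_cons]
    exact ih _ (qr_inner_sq (f2 r) (g2 r) r (hb r List.mem_cons_self).1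
        (hb r List.mem_cons_self).2 cs m hm hcb)
      (fun x hx => hb x (List.mem_cons_of_mem _ hx))

theorem qr_outer_entry (f2 : Int → Int → Int → Bool) (g2 : Int → Int → Int) (cs : List Int)
    (hcnd : cs.Nodup) (hcb : ∀ c ∈ cs, 0 ≤ c ∧ c < 21) (rs : List Int) :
    ∀ (m : List (List Int)), qrSq m → rs.Nodup → (∀ r ∈ rs, 0 ≤ r ∧ r < 21) →
    ∀ (i j : Int), 0 ≤ i → i < 21 → 0 ≤ j → j < 21 →
    mgetA (rs.foldl (fun m r => cs.foldl
      (fun m c => if f2 r c (mgetA m r c) then msetA m r c (g2 r c) else m) m) m) i j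
      = if i ∈ rs ∧ j ∈ cs ∧ f2 i j (mgetA m i j) = true then g2 i j else mgetA m i j := by
  induction rs with
  | nil => intro m hm _ _ i j hi0 hi hj0 hj; simp
  | cons r rs ih =>
    intro m hm hnd hb i j hi0 hi hj0 hj
    have hr0 : 0 ≤ r := (hb r List.mem_cons_self).1
    have hr : r < 21 := (hb r List.mem_cons_self).2
    have hb' : ∀ x ∈ rs, 0 ≤ x ∧ x < 21 := fun x hx => hb x (List.mem_cons_of_mem _ hx)
    have hrn : r ∉ rs := (List.nodup_cons.mp hnd).1
    simp only [List.foldl_cons]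
    set m' := cs.foldl (fun m c => if f2 r c (mgetA m r c) then msetA m r c (g2 r c) else m) m
      with hm'
    have hsq' : qrSq m' := qr_inner_sq (f2 r) (g2 r) r hr0 hr cs m hm hcb
    have hget : ∀ (a b : Int), 0 ≤ a → a < 21 → 0 ≤ b → b < 21 →
        mgetA m' a b = if a = r ∧ b ∈ cs ∧ f2 r b (mgetA m r b) = true
          then g2 r b else mgetA m a b :=
      fun a b ha0 ha hb0 hbb =>
        qr_inner_entry (f2 r) (g2 r) r hr0 hr cs m hm hcnd hcb a b ha0 ha hb0 hbb
    rw [ih m' hsq' (List.nodup_cons.mp hnd).2 hb' i j hi0 hi hj0 hj]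
    by_cases hirs : i ∈ rs
    · have hir : i ≠ r := fun he => hrn (he ▸ hirs)
      have hij : mgetA m' i j = mgetA m i j := by
        rw [hget i j hi0 hi hj0 hj]; exact if_neg (fun hh => hir hh.1)
      rw [hij]
      by_cases hcond : i ∈ rs ∧ j ∈ cs ∧ f2 i j (mgetA m i j) = true
      · rw [if_pos hcond, if_pos ⟨List.mem_cons_of_mem _ hcond.1, hcond.2⟩]
      · rw [if_neg hcond, if_neg (fun hh => hcond ⟨hirs, hh.2⟩)]
    · have hnot : ¬(i ∈ rs ∧ j ∈ cs ∧ f2 i j (mgetA m' i j) = true) := fun hh => hirs hh.1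
      rw [if_neg hnot, hget i j hi0 hi hj0 hj]
      by_cases hcase : i = r ∧ j ∈ cs ∧ f2 r j (mgetA m r j) = true
      · rw [if_pos hcase, if_pos ⟨by rw [hcase.1]; exact List.mem_cons_self,
            hcase.2.1, by rw [← hcase.1] at *; exact hcase.2.2⟩, hcase.1]
      · rw [if_neg hcase, if_neg (fun hh => by
          rcases List.mem_cons.mp hh.1 with he | he
          · exact hcase ⟨he, hh.2.1, he ▸ hh.2.2⟩
          · exact hirs he)]

theorem qr_mget_nat {m : List (List Int)} (a b : Nat) :
    mgetA m (a : Int) (b : Int) = (m.getD a []).getD b 0 := by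
  rw [qr_mget_eq m (Int.natCast_nonneg a) (Int.natCast_nonneg b), Int.toNat_natCast,
      Int.toNat_natCast]

theorem qr_sq_ext {m m' : List (List Int)} (hm : qrSq m) (hm' : qrSq m')
    (h : ∀ (i j : Int), 0 ≤ i → i < 21 → 0 ≤ j → j < 21 → mgetA m i j = mgetA m' i j) :
    m = m' := by
  apply List.ext_getElem (by rw [hm.1, hm'.1])
  intro i h1 h2
  apply List.ext_getElem (by rw [qr_row_len' hm h1, qr_row_len' hm' h2])
  intro j hj1 hj2
  have hi21 : i < 21 := by have := hm.1; omega
  have hj21 : j < 21 := by have := qr_row_len' hm h1; omega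
  have hh := h i j (Int.natCast_nonneg i) (by exact_mod_cast hi21) (Int.natCast_nonneg j) (by exact_mod_cast hj21)
  rw [qr_mget_nat, qr_mget_nat, List.getD_eq_getElem _ _ h1, List.getD_eq_getElem _ _ h2,
      List.getD_eq_getElem _ _ hj1, List.getD_eq_getElem _ _ hj2] at hh
  exact hh

set_option maxHeartbeats 2000000 in
theorem qr_cell (h : Int) (i j : Int) (hi0 : 0 ≤ i) (hi : i < 21) (hj0 : 0 ≤ j) (hj : j < 21) :
    (if (mgetA qrM0 i j == 0 && !is_reserved_py i j 21) = true
     then PySem.Int.band (h >>> (PySem.Int.mod (i * 21 + j) 32).toNat) 1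
     else mgetA qrM0 i j) = qrCellB 21 h i j := by
  interval_cases i <;> interval_cases j <;> rfl

set_option maxRecDepth 40000 in
theorem qr_m0 :
    (PySem.List.pyRange 8 (21 - 8) 1).foldl (fun m i =>
      let m := msetA m 6 i (if PySem.Int.mod i 2 == 0 then 1 else 0)
      msetA m i 6 (if PySem.Int.mod i 2 == 0 then 1 else 0))
      (add_finder_pattern_py (add_finder_pattern_py (add_finder_pattern_py
        (List.replicate 21 (List.replicate 21 (0 : Int))) 0 0) 0 (21 - 7)) (21 - 7) 0)
    = qrM0 := by decide

theorem qr_sq_m0 : qrSq qrM0 := by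
  refine ⟨rfl, ?_⟩
  intro row hrow
  fin_cases hrow <;> rfl

theorem qr_pyRange21_bounds : ∀ x ∈ PySem.List.pyRange 0 21 1, 0 ≤ x ∧ x < 21 := by
  intro x hx; exact PySem.List.mem_pyRange_one.mp hx

theorem qr_sq_bmat (h : Int) :
    qrSq ((PySem.List.pyRange 0 21 1).map (fun r =>
      (PySem.List.pyRange 0 21 1).map (fun c => qrCellB 21 h r c))) := by
  constructor
  · simp [PySem.List.length_pyRange_one]
  · intro row hrow
    rcases List.mem_map.mp hrow with ⟨r, _, hr⟩
    rw [← hr]; simp [PySem.List.length_pyRange_one]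

theorem qr_bmat_entry (h : Int) (i j : Int) (hi0 : 0 ≤ i) (hi : i < 21) (hj0 : 0 ≤ j)
    (hj : j < 21) :
    mgetA ((PySem.List.pyRange 0 21 1).map (fun r =>
      (PySem.List.pyRange 0 21 1).map (fun c => qrCellB 21 h r c))) i j = qrCellB 21 h i j := by
  unfold mgetA
  rw [PySem.List.pyGetD_map_pyRange_of_nonneg _ 21 i _ hi0 hi,
      PySem.List.pyGetD_map_pyRange_of_nonneg _ 21 j _ hj0 hj]

theorem qr_core (h : Int) :
    (PySem.List.pyRange 0 21 1).foldl (fun m r =>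
      (PySem.List.pyRange 0 21 1).foldl (fun m c =>
        if mgetA m r c == 0 && !is_reserved_py r c 21
        then msetA m r c (PySem.Int.band (h >>> (PySem.Int.mod (r * 21 + c) 32).toNat) 1)
        else m) m) qrM0
    = (PySem.List.pyRange 0 21 1).map (fun r =>
        (PySem.List.pyRange 0 21 1).map (fun c => qrCellB 21 h r c)) := by
  apply qr_sq_ext
    (qr_outer_sq (fun r c v => v == 0 && !is_reserved_py r c 21)
      (fun r c => PySem.Int.band (h >>> (PySem.Int.mod (r * 21 + c) 32).toNat) 1)
      (PySem.List.pyRange 0 21 1) qr_pyRange21_bounds (PySem.List.pyRange 0 21 1)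
      qrM0 qr_sq_m0 qr_pyRange21_bounds)
    (qr_sq_bmat h)
  intro i j hi0 hi hj0 hj
  rw [qr_outer_entry (fun r c v => v == 0 && !is_reserved_py r c 21)
      (fun r c => PySem.Int.band (h >>> (PySem.Int.mod (r * 21 + c) 32).toNat) 1)
      (PySem.List.pyRange 0 21 1) (PySem.List.nodup_pyRange_one 0 21) qr_pyRange21_bounds
      (PySem.List.pyRange 0 21 1) qrM0 qr_sq_m0 (PySem.List.nodup_pyRange_one 0 21)
      qr_pyRange21_bounds i j hi0 hi hj0 hj,
    qr_bmat_entry h i j hi0 hi hj0 hj]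
  have hmem : (i ∈ PySem.List.pyRange 0 21 1 ∧ j ∈ PySem.List.pyRange 0 21 1 ∧
      (mgetA qrM0 i j == 0 && !is_reserved_py i j 21) = true)
      ↔ (mgetA qrM0 i j == 0 && !is_reserved_py i j 21) = true := by
    constructor
    · exact fun hh => hh.2.2
    · exact fun hh => ⟨PySem.List.mem_pyRange_one.mpr ⟨hi0, hi⟩,
        PySem.List.mem_pyRange_one.mpr ⟨hj0, hj⟩, hh⟩
  rw [if_congr hmem rfl rfl]
  exact qr_cell h i j hi0 hi hj0 hj

-- ===== VERDICT =====
set_option maxHeartbeats 1000000 in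
theorem generate_qr_fallback_py_spec : Claim_equal_generate_qr_fallback_py := by
  intro data _
  unfold Spec_generate_qr_fallback_py generate_qr_fallback_py generate_qr_fallback_py_alt
  dsimp only []
  rw [qr_m0]
  exact qr_core _
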